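-- pv_equiv track=rewrite | github.com/tenomiss/tp5_algo1 | ex03_somme_maximale_q1.py | somme_maximale
-- ===== SOURCE A (Python) =====
-- def somme_maximale(tab):
--   n = len(tab)
--   maximum = tab[0]+tab[1]
--   for i in range(n):
--     for j in range(i+1,n):
--       if tab[i]+tab[j]>maximum:
--         maximum = tab[i]+tab[j]
--   return maximum
-- ===== SOURCE B (Python) =====
-- def somme_maximale(tab):
--   s = sorted(tab)
--   return s[-1] + s[-2]
-- ===== Notes on version B (the rewrite author's own statement) =====
-- stated objective: faster
-- what changed: Replaces the nested all-pairs scan with sorting the list once and summing its last two elements (the two largest).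
import Mathlib
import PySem

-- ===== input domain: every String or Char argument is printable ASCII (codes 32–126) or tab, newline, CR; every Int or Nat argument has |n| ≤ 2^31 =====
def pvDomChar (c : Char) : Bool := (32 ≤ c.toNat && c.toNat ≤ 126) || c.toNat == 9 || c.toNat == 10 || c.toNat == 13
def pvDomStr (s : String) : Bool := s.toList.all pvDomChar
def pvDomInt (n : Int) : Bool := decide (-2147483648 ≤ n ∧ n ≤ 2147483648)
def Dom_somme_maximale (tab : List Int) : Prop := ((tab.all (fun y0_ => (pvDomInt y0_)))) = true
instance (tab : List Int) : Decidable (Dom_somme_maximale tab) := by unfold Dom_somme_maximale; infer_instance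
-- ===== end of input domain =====

-- B replaces A's quadratic all-pairs scan by sorting once and summing the last two elements (objective: faster).

-- ===== PORT A =====
def somme_maximale (tab : List Int) : Int :=
  let n : Int := tab.length
  let maximum := PySem.List.pyGetD tab 0 0 + PySem.List.pyGetD tab 1 0
  (PySem.List.pyRange 0 n 1).foldl (fun m i =>
    (PySem.List.pyRange (i+1) n 1).foldl (fun m j =>
      if PySem.List.pyGetD tab i 0 + PySem.List.pyGetD tab j 0 > m
      then PySem.List.pyGetD tab i 0 + PySem.List.pyGetD tab j 0
      else m) m) maximum

-- ===== PORT B =====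
def somme_maximale_alt (tab : List Int) : Int :=
  let s := PySem.List.sorted tab (fun x => x) false
  PySem.List.pyGetD s (-1) 0 + PySem.List.pyGetD s (-2) 0

-- ===== PRECONDITION & SPEC =====
-- Python A raises IndexError on tab[0]/tab[1] (and B on s[-2]) when the list has fewer than two elements.
def Pre_somme_maximale (tab : List Int) : Prop := 2 ≤ tab.length
instance (tab : List Int) : Decidable (Pre_somme_maximale tab) := by unfold Pre_somme_maximale; infer_instance
def pvWitness_somme_maximale : List Int := ([3, -1, 4])
def Spec_somme_maximale (tab : List Int) (out : Int) : Prop := out = somme_maximale_alt tab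
instance (tab : List Int) (out : Int) : Decidable (Spec_somme_maximale tab out) := by unfold Spec_somme_maximale; infer_instance

-- ===== CLAIM (what is proved, stated in full; the proofs are below) =====
def Claim_equal_somme_maximale : Prop := ∀ (tab : List Int), Dom_somme_maximale tab → Pre_somme_maximale tab → Spec_somme_maximale tab (somme_maximale tab)

-- ===== LEMMAS AND PROOFS =====

-- All sums tab[i]+tab[j] with i < j, front to back.
def pairSums : List Int → List Int
  | [] => []
  | x :: xs => xs.map (fun y => x + y) ++ pairSums xs

lemma mem_pairSums {v : Int} {l : List Int} :
    v ∈ pairSums l ↔ ∃ i j : Nat, i < j ∧ j < l.length ∧ v = l.getD i 0 + l.getD j 0 := by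
  induction l with
  | nil => simp [pairSums]
  | cons x xs ih =>
    simp only [pairSums, List.mem_append, List.mem_map, ih]
    constructor
    · rintro (⟨y, hy, rfl⟩ | ⟨i, j, hij, hj, rfl⟩)
      · obtain ⟨k, hk, rfl⟩ := List.mem_iff_getElem.mp hy
        refine ⟨0, k + 1, by omega, by simp; omega, ?_⟩
        rw [List.getD_cons_zero, List.getD_cons_succ, List.getD_eq_getElem _ _ hk]
      · refine ⟨i + 1, j + 1, by omega, by simp at hj ⊢; omega, ?_⟩
        rw [List.getD_cons_succ, List.getD_cons_succ]
    · rintro ⟨i, j, hij, hj, rfl⟩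
      cases i with
      | zero =>
        obtain ⟨k, rfl⟩ : ∃ k, j = k + 1 := ⟨j - 1, by omega⟩
        have hk : k < xs.length := by simp at hj; omega
        left
        refine ⟨xs.getD k 0, ?_, by rw [List.getD_cons_zero, List.getD_cons_succ]⟩
        rw [List.getD_eq_getElem _ _ hk]; exact List.getElem_mem hk
      | succ i' =>
        obtain ⟨k, rfl⟩ : ∃ k, j = k + 1 := ⟨j - 1, by omega⟩
        right
        refine ⟨i', k, by omega, by simp at hj ⊢; omega, ?_⟩
        rw [List.getD_cons_succ, List.getD_cons_succ]

lemma pairSums_perm {l l' : List Int} (h : l.Perm l') : (pairSums l).Perm (pairSums l') := by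
  induction h with
  | nil => simp
  | cons x h ih => exact ((h.map _).append ih)
  | swap a b l =>
    simp only [pairSums, List.map_cons, List.cons_append, ← List.append_assoc]
    rw [Int.add_comm b a]
    exact List.Perm.cons _ ((List.perm_append_comm).append_right _)
  | trans _ _ ih1 ih2 => exact ih1.trans ih2

lemma foldl_max_eq {T : Int} {l : List Int} : ∀ {c : Int}, c ≤ T → (∀ x ∈ l, x ≤ T) →
    (T ∈ l ∨ T = c) → l.foldl max c = T := by
  induction l with
  | nil =>
    intro c hc _ hmem
    rcases hmem with h | h
    · cases h
    · simp; omega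
  | cons x xs ih =>
    intro c hc hall hmem
    rw [List.foldl_cons]
    have hx : x ≤ T := hall x (by simp)
    refine ih (by omega) (fun y hy => hall y (by simp [hy])) ?_
    rcases hmem with h | h
    · rcases List.mem_cons.mp h with h | h
      · right; omega
      · left; exact h
    · right; omega

-- The inner Python loop, as a fold over the suffix.
lemma inner_loop (tab : List Int) (x m : Int) (k : Nat) :
    (PySem.List.pyRange ((k : Int) + 1) (tab.length : Int) 1).foldl
      (fun m j => if x + PySem.List.pyGetD tab j 0 > m then x + PySem.List.pyGetD tab j 0 else m) m
    = ((tab.drop (k + 1)).map (fun y => x + y)).foldl max m := by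
  have h1 : (PySem.List.pyRange ((k : Int) + 1) (tab.length : Int) 1).foldl
      (fun m j => if x + PySem.List.pyGetD tab j 0 > m then x + PySem.List.pyGetD tab j 0 else m) m
      = (PySem.List.pyRange ((k : Int) + 1) (tab.length : Int) 1).foldl
      (fun m j => max m (x + PySem.List.pyGetD tab j 0)) m := by
    congr 1; funext m j; rw [max_def]; split <;> split <;> omega
  have h2 := PySem.List.foldl_pyRange_pyGetD tab 0 (fun acc y => max acc (x + y)) m
    (a := (k : Int) + 1) (by positivity)
  have h3 : ((k : Int) + 1).toNat = k + 1 := by omega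
  have h4 : PySem.List.len tab = (tab.length : Int) := by simp [PySem.List.len]
  beta_reduce at h2
  rw [h4, h3] at h2
  rw [h1, h2, List.foldl_map]

-- The outer Python loop from index k equals a max-fold over pairSums of the suffix.
lemma outer_loop (tab : List Int) : ∀ (k : Nat) (m : Int),
    (PySem.List.pyRange (k : Int) (tab.length : Int) 1).foldl
      (fun m i =>
        (PySem.List.pyRange (i+1) (tab.length : Int) 1).foldl
          (fun m j => if PySem.List.pyGetD tab i 0 + PySem.List.pyGetD tab j 0 > m
            then PySem.List.pyGetD tab i 0 + PySem.List.pyGetD tab j 0 else m) m) m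
    = (pairSums (tab.drop k)).foldl max m := by
  intro k
  induction hn : tab.length - k generalizing k with
  | zero =>
    intro m
    have hk : tab.length ≤ k := by omega
    rw [PySem.List.pyRange_one_eq_nil (by exact_mod_cast hk), List.drop_eq_nil_of_le hk]
    simp [pairSums]
  | succ n ih =>
    intro m
    have hk : k < tab.length := by omega
    rw [PySem.List.pyRange_one_cons (by exact_mod_cast hk), List.foldl_cons,
      inner_loop tab (PySem.List.pyGetD tab (k : Int) 0) m k]
    have hstep : ((k : Int) + 1) = ((k + 1 : Nat) : Int) := by push_cast; ring
    rw [hstep, ih (k+1) (by omega), List.drop_eq_getElem_cons hk]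
    simp only [pairSums, List.foldl_append]
    have hgk : PySem.List.pyGetD tab ((k : Nat) : Int) 0 = tab[k] := by
      rw [PySem.List.pyGetD_natCast, List.getD_eq_getElem _ _ hk]
    rw [hgk]

-- A computes the max-fold of all pair sums seeded with tab[0]+tab[1].
lemma somme_maximale_eq_fold (tab : List Int) :
    somme_maximale tab = (pairSums tab).foldl max (tab.getD 0 0 + tab.getD 1 0) := by
  unfold somme_maximale
  have h := outer_loop tab 0 (PySem.List.pyGetD tab 0 0 + PySem.List.pyGetD tab 1 0)
  rw [Nat.cast_zero, List.drop_zero] at h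
  rw [h, PySem.List.pyGetD_zero, PySem.List.pyGetD_ofNat' tab 1 0]

-- On a ≤-sorted list every pair sum is bounded by the sum of the last two elements.
lemma sorted_pair_le {s : List Int} (hs : s.Pairwise (· ≤ ·)) (h2 : 2 ≤ s.length) :
    ∀ v ∈ pairSums s, v ≤ s.getD (s.length - 2) 0 + s.getD (s.length - 1) 0 := by
  intro v hv
  obtain ⟨i, j, hij, hj, rfl⟩ := mem_pairSums.mp hv
  have hget := List.pairwise_iff_getElem.mp hs
  have hi : i < s.length := by omega
  have h1 : s.getD i 0 ≤ s.getD (s.length - 2) 0 := by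
    rcases Nat.lt_or_ge i (s.length - 2) with h | h
    · rw [List.getD_eq_getElem _ _ hi,
        List.getD_eq_getElem _ _ (show s.length - 2 < s.length by omega)]
      exact hget i (s.length - 2) hi (by omega) h
    · have he : i = s.length - 2 := by omega
      rw [he]
  have h2' : s.getD j 0 ≤ s.getD (s.length - 1) 0 := by
    rcases Nat.lt_or_ge j (s.length - 1) with h | h
    · rw [List.getD_eq_getElem _ _ hj,
        List.getD_eq_getElem _ _ (show s.length - 1 < s.length by omega)]
      exact hget j (s.length - 1) hj (by omega) h
    · have he : j = s.length - 1 := by omega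
      rw [he]
  omega

-- The sum of the last two elements is itself a pair sum.
lemma top_mem_pairSums {s : List Int} (h2 : 2 ≤ s.length) :
    s.getD (s.length - 2) 0 + s.getD (s.length - 1) 0 ∈ pairSums s :=
  mem_pairSums.mpr ⟨s.length - 2, s.length - 1, by omega, by omega, rfl⟩

-- ===== VERDICT (by name: the statement is the Claim_ definition above) =====
theorem somme_maximale_spec : Claim_equal_somme_maximale := by
  intro tab _ hpre
  have hpre' : 2 ≤ tab.length := hpre
  unfold Spec_somme_maximale somme_maximale_alt
  dsimp only
  have hperm : (PySem.List.sorted tab (fun x => x) false).Perm tab :=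
    PySem.List.sorted_perm tab (fun x => x) false
  have hpair : (PySem.List.sorted tab (fun x => x) false).Pairwise (· ≤ ·) :=
    PySem.List.sorted_pairwise tab (fun x => x)
  generalize hsg : PySem.List.sorted tab (fun x => x) false = s at *
  have hlen : s.length = tab.length := hperm.length_eq
  have h2 : 2 ≤ s.length := by omega
  have hpp : (pairSums tab).Perm (pairSums s) := pairSums_perm hperm.symm
  have hT : s.getD (s.length - 2) 0 + s.getD (s.length - 1) 0 ∈ pairSums tab :=
    hpp.mem_iff.mpr (top_mem_pairSums h2)
  have hall : ∀ x ∈ pairSums tab, x ≤ s.getD (s.length - 2) 0 + s.getD (s.length - 1) 0 :=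
    fun x hx => sorted_pair_le hpair h2 x (hpp.subset hx)
  have hc : tab.getD 0 0 + tab.getD 1 0 ∈ pairSums tab :=
    mem_pairSums.mpr ⟨0, 1, by omega, by omega, rfl⟩
  rw [somme_maximale_eq_fold tab, foldl_max_eq (hall _ hc) hall (Or.inl hT),
    PySem.List.pyGetD_neg_ofNat s 1 0 (by omega) (by omega),
    PySem.List.pyGetD_neg_ofNat s 2 0 (by omega) (by omega),
    List.getD_eq_getElem _ _ (show s.length - 2 < s.length by omega),
    List.getD_eq_getElem _ _ (show s.length - 1 < s.length by omega)]
  omega
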